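-- pv_equiv track=rewrite | github.com/rickrebel/ocamis-backend | respond/data_file_mixins/get_data_mix_real.py | calculate_isolated
-- ===== SOURCE A (Python) =====
-- def calculate_isolated(current_headers):
--     not_null_alone = []
--     some_null = False
--     for header in current_headers[1:]:
--         if not header:
--             some_null = True
--         if some_null and header:
--             not_null_alone.append(header)
--     return not_null_alone
-- ===== SOURCE B (Python) =====
-- def calculate_isolated(current_headers):
--     tail = current_headers[1:]
--     return [h for i, h in enumerate(tail) if h and not all(tail[:i])]
-- ===== Notes on version B (the rewrite author's own statement) =====
-- stated objective: alternative
-- what changed: Replaced the sequential flag-carrying pass by a positional characterisation: each element of the tail is kept iff it is truthy and some falsy element precedes it (a per-element prefix test via enumerate and all(tail[:i])), with no skip/state threading.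
import Mathlib
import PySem

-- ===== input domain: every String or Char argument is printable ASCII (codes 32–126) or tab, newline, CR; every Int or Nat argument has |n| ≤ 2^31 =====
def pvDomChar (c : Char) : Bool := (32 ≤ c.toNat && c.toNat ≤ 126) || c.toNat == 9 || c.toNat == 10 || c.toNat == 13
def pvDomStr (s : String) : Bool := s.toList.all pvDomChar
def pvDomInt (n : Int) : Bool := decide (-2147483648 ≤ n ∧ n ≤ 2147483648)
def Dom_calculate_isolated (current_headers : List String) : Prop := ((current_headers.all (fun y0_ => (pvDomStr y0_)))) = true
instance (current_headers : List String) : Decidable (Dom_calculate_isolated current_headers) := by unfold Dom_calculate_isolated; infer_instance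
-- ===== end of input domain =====

-- ===== PORT A =====
-- A: single pass over current_headers[1:] carrying a some_null flag and an accumulator.
def calculate_isolated (current_headers : List String) : List String :=
  ((PySem.List.slice current_headers (some 1) none).foldl
    (fun (st : Bool × List String) header =>
      let some_null := if header = "" then true else st.1
      let acc := if some_null ∧ header ≠ "" then st.2 ++ [header] else st.2
      (some_null, acc))
    (false, [])).2

-- ===== PORT B =====
-- B (alternative, stateless characterisation): keep tail[i] iff it is truthy and some
-- falsy element occurs among tail[:i]; no flag or sequential skip is threaded.
def calculate_isolated_alt (current_headers : List String) : List String :=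
  let tail := PySem.List.slice current_headers (some 1) none
  ((PySem.List.enumerate tail).filter
    (fun p => p.2 != "" && (PySem.List.slice tail none (some p.1)).any (fun x => x == ""))).map (·.2)

-- ===== PRECONDITION & SPEC =====
def Spec_calculate_isolated (current_headers : List String) (out : List String) : Prop := out = calculate_isolated_alt current_headers
instance (current_headers : List String) (out : List String) : Decidable (Spec_calculate_isolated current_headers out) := by unfold Spec_calculate_isolated; infer_instance

-- ===== CLAIM (what is proved, stated in full; the proofs are below) =====
def Claim_equal_calculate_isolated : Prop := ∀ (current_headers : List String), Dom_calculate_isolated current_headers → Spec_calculate_isolated current_headers (calculate_isolated current_headers)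

-- ===== LEMMAS AND PROOFS =====
-- loop body of A, named for the lemmas
def aStep (st : Bool × List String) (header : String) : Bool × List String :=
  let some_null := if header = "" then true else st.1
  let acc := if some_null ∧ header ≠ "" then st.2 ++ [header] else st.2
  (some_null, acc)

theorem aStep_true : ∀ (l acc : List String),
    l.foldl aStep (true, acc) = (true, acc ++ l.filter (fun h => h ≠ "")) := by
  intro l
  induction l with
  | nil => intro acc; simp
  | cons h t ih =>
    intro acc
    by_cases hh : h = "" <;> simp [aStep, hh, ih]

theorem aSide : ∀ (l acc : List String),
    (l.foldl aStep (false, acc)).2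
      = acc ++ (l.dropWhile (fun h => h ≠ "")).filter (fun h => h ≠ "") := by
  intro l
  induction l with
  | nil => intro acc; simp
  | cons h t ih =>
    intro acc
    by_cases hh : h = ""
    · simp [aStep, hh, aStep_true]
    · simp [aStep, hh, ih]

theorem bGen : ∀ (t pre : List String),
    ((PySem.List.enumerate t (pre.length : Int)).filter
      (fun p => p.2 != "" && (PySem.List.slice (pre ++ t) none (some p.1)).any (fun x => x == ""))).map (·.2)
    = if pre.any (fun x => x == "") then t.filter (fun h => h ≠ "")
      else (t.dropWhile (fun h => h ≠ "")).filter (fun h => h ≠ "") := by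
  intro t
  induction t with
  | nil => intro pre; simp [PySem.List.enumerate]
  | cons x r ih =>
    intro pre
    have hshift : ((pre ++ [x]).length : Int) = (pre.length : Int) + 1 := by
      simp
    have hslice : PySem.List.slice (pre ++ x :: r) none (some (pre.length : Int)) = pre := by
      rw [PySem.List.slice_to_natCast]
      simp
    have happ : (pre ++ [x]) ++ r = pre ++ x :: r := by simp
    have hrec := ih (pre ++ [x])
    rw [happ, hshift] at hrec
    rw [PySem.List.enumerate_cons, List.filter_cons]
    by_cases hx : x = ""
    · subst hx
      have hp' : ((pre ++ [""]).any (fun x => x == "")) = true := by simp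
      rw [hp', if_pos rfl] at hrec
      by_cases hp : pre.any (fun x => x == "") = true
      · simp only [hslice, hp]
        simp [hrec]
      · simp only [hslice]
        simp only [List.any_eq_true] at hp
        simp [hrec]
    · by_cases hp : pre.any (fun x => x == "") = true
      · have hp' : ((pre ++ [x]).any (fun x => x == "")) = true := by
          simp [List.any_append, hp]
        rw [hp', if_pos rfl] at hrec
        simp only [hslice, hp]
        simp [hrec, hx]
      · have hp' : ((pre ++ [x]).any (fun x => x == "")) = false := by
          simp only [List.any_append, Bool.or_eq_false_iff]
          constructor
          · exact Bool.eq_false_iff.mpr (fun h => hp h)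
          · simp [hx]
        rw [hp', if_neg (by simp)] at hrec
        simp only [hslice, hp]
        simp [hrec, hx]

-- ===== VERDICT (by name: the statement is the Claim_ definition above) =====
theorem calculate_isolated_spec : Claim_equal_calculate_isolated := by
  intro current_headers _
  show calculate_isolated current_headers = calculate_isolated_alt current_headers
  have hA := aSide (PySem.List.slice current_headers (some 1) none) []
  have hB := bGen (PySem.List.slice current_headers (some 1) none) []
  simp only [List.nil_append, List.length_nil, Nat.cast_zero, List.any_nil,
    Bool.false_eq_true, ite_false] at hA hB
  exact hA.trans hB.symm
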